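-- pv_equiv track=rewrite | github.com/tastuteche/text-bio-align | text_bio_align/prefix_free.py | prefix_free_decompression
-- ===== SOURCE A (Python) =====
-- def reverse_dict(dictionary):
--     """
--     >>> sorted(reverse_dict({1 : "a", 2 : "b"}).items())
--     [('a', 1), ('b', 2)]
--     """
--     return {value: key for key, value in dictionary.items()}
--
-- def prefix_free_decompression(compressed, translation_dict):
--     """
--     Decompresses a prefix free `compressed` message in the form of a string
--     composed only of '0' and '1'.
--
--     Being the binary codes prefix free,
--     the decompression is allowed to take the earliest match it finds.
--
--     >>> message, d, message_pos = prefix_free_compression("aaaaa bbbb ccc dd e", ["01", "11"])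
--     >>> message
--     '0101010101A0111111111A01C01C01C01A01G01G01A01T01'
--     >>> sorted(d.items())
--     [(' ', 'A01'), ('a', '01'), ('b', '11'), ('c', 'C01'), ('d', 'G01'), ('e', 'T01')]
--     >>> ''.join(prefix_free_decompression(message, d))
--     'aaaaa bbbb ccc dd e'
--     """
--     decoding_translate = reverse_dict(translation_dict)
--     word = ''
--     for bit in compressed:
--         if word in decoding_translate:
--             yield decoding_translate[word]
--             word = ''
--         word += bit
--     yield decoding_translate[word]
-- ===== SOURCE B (Python) =====
-- def prefix_free_decompression(compressed, translation_dict):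
--     # Build a trie of the codes (nested dicts); the '' key marks an accepting
--     # node and holds its decoded symbol (later duplicate codes overwrite it,
--     # like the reversed dict).  Decode by walking one trie edge per bit.
--     root = {}
--     for symbol, code in translation_dict.items():
--         node = root
--         for bit in code:
--             node = node.setdefault(bit, {})
--         node[''] = symbol
--     node = root
--     for bit in compressed:
--         if '' in node:
--             yield node['']
--             node = root
--         node = node[bit]
--     yield node['']
-- ===== Notes on version B (the rewrite author's own statement) =====
-- stated objective: alternative
-- what changed: B builds a trie of the codes once and decodes by walking one trie edge per bit with an incremental node pointer, instead of A's concatenating a growing word string and hashing the whole word in the reversed dict at every bit.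
import Mathlib
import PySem

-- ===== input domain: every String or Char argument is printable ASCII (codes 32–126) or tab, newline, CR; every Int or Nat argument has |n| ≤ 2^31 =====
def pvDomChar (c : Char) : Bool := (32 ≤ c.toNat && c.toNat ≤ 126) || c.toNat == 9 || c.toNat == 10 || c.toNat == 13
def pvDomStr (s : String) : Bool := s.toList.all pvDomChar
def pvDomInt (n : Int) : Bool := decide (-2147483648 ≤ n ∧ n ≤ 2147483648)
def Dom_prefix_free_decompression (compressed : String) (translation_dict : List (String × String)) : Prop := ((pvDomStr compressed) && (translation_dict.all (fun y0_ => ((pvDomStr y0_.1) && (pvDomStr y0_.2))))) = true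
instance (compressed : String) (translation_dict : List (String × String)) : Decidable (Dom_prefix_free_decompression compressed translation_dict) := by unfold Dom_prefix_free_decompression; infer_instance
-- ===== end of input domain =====

-- B replaces A's repeated whole-word dict lookups by a trie of the codes walked one
-- edge per bit (alternative data structure); return-value equivalence of the two
-- generators' yielded sequences, materialised as lists.

-- ===== PORT A =====
-- helper reverse_dict of A: {value: key for key, value in dictionary.items()}
def reverse_dict (dictionary : List (String × String)) : PySem.Dict String String :=
  dictionary.foldl (fun d kv => d.insert kv.2 kv.1) PySem.Dict.empty

-- the generator's yielded sequence as a list; the final `yield decoding_translate[word]`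
-- raises KeyError when word is absent (outside Pre_), ported with default "".
def prefix_free_decompression (compressed : String) (translation_dict : List (String × String)) : List String :=
  let dt := reverse_dict translation_dict
  let st := compressed.toList.foldl
    (fun (s : List String × List Char) bit =>
      match dt.get? (String.ofList s.2) with
      | some v => (s.1 ++ [v], [bit])      -- yield dict[word]; word = ''; word += bit
      | none => (s.1, s.2 ++ [bit]))       -- word += bit
    ([], [])
  st.1 ++ [dt.getD (String.ofList st.2) ""]

-- ===== PORT B =====
-- trie node: optional decoded symbol (Python's '' key) and a child list (an explicit
-- mutual child-list type, since the nested-inductive encoding is not allowed)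
mutual
inductive PTrie : Type
  | mk : Option String → PChildren → PTrie
inductive PChildren : Type
  | nil : PChildren
  | cons : Char → PTrie → PChildren → PChildren
end

def PTrie.val : PTrie → Option String
  | .mk v _ => v

def PTrie.ch : PTrie → PChildren
  | .mk _ c => c

def emptyTrie : PTrie := .mk none .nil

def childGet : PChildren → Char → Option PTrie
  | .nil, _ => none
  | .cons c t r, b => if b = c then some t else childGet r b

def childSet : PChildren → Char → PTrie → PChildren
  | .nil, b, t => .cons b t .nil
  | .cons c t0 r, b, t => if b = c then .cons c t r else .cons c t0 (childSet r b t)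

-- node = node.setdefault(bit, {}) …; node[''] = symbol, functionally
def insertCode : PTrie → List Char → String → PTrie
  | t, [], sym => .mk (some sym) t.ch
  | t, c :: p, sym =>
      .mk t.val (childSet t.ch c (insertCode ((childGet t.ch c).getD emptyTrie) p sym))

def buildTrie (translation_dict : List (String × String)) : PTrie :=
  translation_dict.foldl (fun t kv => insertCode t kv.2.toList kv.1) emptyTrie

-- node = node[bit] raises KeyError on a missing child (outside Pre_), ported as a dead node
def prefix_free_decompression_alt (compressed : String) (translation_dict : List (String × String)) : List String :=
  let root := buildTrie translation_dict
  let st := compressed.toList.foldl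
    (fun (s : List String × PTrie) bit =>
      let s1 := match s.2.val with
        | some v => (s.1 ++ [v], root)     -- if '' in node: yield node['']; node = root
        | none => s
      match childGet s1.2.ch bit with      -- node = node[bit]
      | some n => (s1.1, n)
      | none => (s1.1, emptyTrie))
    ([], root)
  st.1 ++ [st.2.val.getD ""]               -- yield node['']

-- ===== PRECONDITION & SPEC =====
-- specification-level greedy decoder, used only to state which inputs decode:
-- munchLen dt w rest = number of further bits needed before the growing word w
-- first becomes a code (earliest match), none if it never does
def munchLen (dt : PySem.Dict String String) : List Char → List Char → Option Nat
  | w, [] => if (dt.get? (String.ofList w)).isSome then some 0 else none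
  | w, b :: r =>
    if (dt.get? (String.ofList w)).isSome then some 0
    else (munchLen dt (w ++ [b]) r).map (· + 1)

-- gdecTab dt s: for every suffix of s (longest first, down to []), whether it is a
-- concatenation of codes under greedy earliest-match — a bottom-up table, so that
-- the condition is a total structural computation, not a re-run of either port
def gdecTab (dt : PySem.Dict String String) : List Char → List Bool
  | [] => [true]
  | b :: s =>
    let tab := gdecTab dt s
    (match munchLen dt [b] s with
     | none => false
     | some k => tab.getD k false) :: tab

def gdec (dt : PySem.Dict String String) (s : List Char) : Bool :=
  (gdecTab dt s).headD false

-- Pre_ excludes exactly the inputs on which A's final `decoding_translate[word]` raises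
-- KeyError: the bit stream must tokenise under greedy earliest-match into codes of the
-- reversed dict (empty stream: '' must itself be a code).
def Pre_prefix_free_decompression (compressed : String) (translation_dict : List (String × String)) : Prop :=
  (if compressed.toList = [] then ((reverse_dict translation_dict).get? "").isSome
   else gdec (reverse_dict translation_dict) compressed.toList) = true

instance (compressed : String) (translation_dict : List (String × String)) : Decidable (Pre_prefix_free_decompression compressed translation_dict) := by unfold Pre_prefix_free_decompression; infer_instance

def pvWitness_prefix_free_decompression : String × (List (String × String)) :=
  ("010111", [("a", "01"), ("b", "11")])

def Spec_prefix_free_decompression (compressed : String) (translation_dict : List (String × String)) (out : List String) : Prop := out = prefix_free_decompression_alt compressed translation_dict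
instance (compressed : String) (translation_dict : List (String × String)) (out : List String) : Decidable (Spec_prefix_free_decompression compressed translation_dict out) := by unfold Spec_prefix_free_decompression; infer_instance

-- ===== CLAIM (what is proved, stated in full; the proofs are below) =====
def Claim_equal_prefix_free_decompression : Prop := ∀ (compressed : String) (translation_dict : List (String × String)), Dom_prefix_free_decompression compressed translation_dict → Pre_prefix_free_decompression compressed translation_dict → Spec_prefix_free_decompression compressed translation_dict (prefix_free_decompression compressed translation_dict)

-- ===== LEMMAS AND PROOFS =====

theorem PTrie.val_mk (v : Option String) (c : PChildren) : (PTrie.mk v c).val = v := rfl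
theorem PTrie.ch_mk (v : Option String) (c : PChildren) : (PTrie.mk v c).ch = c := rfl

-- A's loop success predicate: the word-accumulating state machine ends on a code
def gstate (dt : PySem.Dict String String) : List Char → List Char → Bool
  | w, [] => (dt.get? (String.ofList w)).isSome
  | w, b :: s =>
    if (dt.get? (String.ofList w)).isSome then gstate dt [b] s else gstate dt (w ++ [b]) s

def descend? : PTrie → List Char → Option PTrie
  | t, [] => some t
  | t, c :: w =>
    match childGet t.ch c with
    | none => none
    | some n => descend? n w

def valAt : PTrie → List Char → Option String
  | t, [] => t.val
  | t, c :: w =>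
    match childGet t.ch c with
    | none => none
    | some n => valAt n w

theorem valAt_eq_descend (w : List Char) : ∀ (t : PTrie),
    valAt t w = (descend? t w).bind PTrie.val := by
  induction w with
  | nil => intro t; rfl
  | cons c w ih =>
    intro t
    simp only [valAt, descend?]
    cases childGet t.ch c <;> simp [ih]

theorem descend?_append (t : PTrie) (u v : List Char) :
    descend? t (u ++ v) = (descend? t u).bind (fun n => descend? n v) := by
  induction u generalizing t with
  | nil => simp [descend?]
  | cons c u ih =>
    simp only [List.cons_append, descend?]
    cases childGet t.ch c <;> simp [ih]

theorem childGet_childSet : ∀ (ch : PChildren) (c b : Char) (t : PTrie),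
    childGet (childSet ch c t) b = if b = c then some t else childGet ch b
  | .nil, c, b, t => by simp [childSet, childGet]
  | .cons c0 t0 r, c, b, t => by
    simp only [childSet]
    by_cases h : c = c0
    · subst h
      by_cases hb : b = c <;> simp [childGet, hb]
    · rw [if_neg h]
      simp only [childGet]
      by_cases hb : b = c0
      · subst hb
        simp [Ne.symm h]
      · simp [hb, childGet_childSet r c b t]

theorem valAt_emptyTrie (w : List Char) : valAt emptyTrie w = none := by
  cases w <;> simp [valAt, emptyTrie, PTrie.val_mk, PTrie.ch_mk, childGet]

theorem valAt_insertCode : ∀ (p : List Char) (sym : String) (t : PTrie) (w : List Char),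
    valAt (insertCode t p sym) w = if w = p then some sym else valAt t w
  | [], sym, t, [] => by simp [insertCode, valAt, PTrie.val_mk]
  | [], sym, t, c :: w' => by simp [insertCode, valAt, PTrie.ch_mk]
  | c :: p', sym, t, [] => by simp [insertCode, valAt, PTrie.val_mk]
  | c :: p', sym, t, b :: w' => by
    by_cases hb : b = c
    · subst hb
      have key : valAt (insertCode t (b :: p') sym) (b :: w')
          = valAt (insertCode ((childGet t.ch b).getD emptyTrie) p' sym) w' := by
        simp [valAt, insertCode, PTrie.ch_mk, childGet_childSet]
      rw [key, valAt_insertCode p' sym ((childGet t.ch b).getD emptyTrie) w']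
      by_cases hw : w' = p'
      · simp [hw]
      · rw [if_neg hw, if_neg (by simp [hw] : ¬ (b :: w' = b :: p'))]
        cases hcg : childGet t.ch b with
        | none => simp [valAt, hcg, valAt_emptyTrie]
        | some n => simp [valAt, hcg]
    · rw [if_neg (by simp [hb] : ¬ (b :: w' = c :: p'))]
      simp [valAt, insertCode, PTrie.ch_mk, childGet_childSet, hb]
termination_by p _ _ _ => p.length

theorem valAt_build_aux (l : List (String × String)) :
    ∀ (t : PTrie) (d : PySem.Dict String String),
      (∀ w, valAt t w = d.get? (String.ofList w)) →
      ∀ w, valAt (l.foldl (fun t kv => insertCode t kv.2.toList kv.1) t) w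
          = (l.foldl (fun d kv => d.insert kv.2 kv.1) d).get? (String.ofList w) := by
  induction l with
  | nil => intro t d h w; simpa using h w
  | cons kv l ih =>
    intro t d h w
    simp only [List.foldl_cons]
    refine ih _ _ ?_ w
    intro w'
    rw [valAt_insertCode, PySem.Dict.get?_insert]
    by_cases hw : w' = kv.2.toList
    · have h2 : String.ofList w' = kv.2 := by rw [hw]; simp
      simp [hw]
    · have h2 : String.ofList w' ≠ kv.2 := by
        intro hc
        apply hw
        have := congrArg String.toList hc
        simpa using this
      simp [hw, h2, h w']

theorem valAt_root (td : List (String × String)) (w : List Char) :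
    valAt (buildTrie td) w = (reverse_dict td).get? (String.ofList w) := by
  unfold buildTrie reverse_dict
  exact valAt_build_aux td emptyTrie PySem.Dict.empty (fun w => by simp [valAt_emptyTrie]) w

-- once the word leaves every code's prefix set, greedy matching can never succeed
theorem gstate_bad (dt : PySem.Dict String String) :
    ∀ (s w : List Char),
      (∀ ext, (dt.get? (String.ofList (w ++ ext))).isSome = false) →
      gstate dt w s = false := by
  intro s
  induction s with
  | nil =>
    intro w h
    have := h []
    simpa [gstate] using this
  | cons b s ih =>
    intro w h
    have h0 := h []
    simp at h0
    simp [gstate, h0]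
    exact ih (w ++ [b]) (fun ext => by simpa [List.append_assoc] using h ([b] ++ ext))

theorem munchLen_le (dt : PySem.Dict String String) :
    ∀ (r w : List Char) (k : Nat), munchLen dt w r = some k → k ≤ r.length := by
  intro r
  induction r with
  | nil => intro w k h; simp [munchLen] at h; simp [h.2]
  | cons b r ih =>
    intro w k h
    simp [munchLen] at h
    split at h
    · cases h; simp
    · obtain ⟨k', hk', rfl⟩ := Option.map_eq_some_iff.mp h
      have := ih (w ++ [b]) k' hk'
      simp; omega

theorem getD_gdecTab (dt : PySem.Dict String String) :
    ∀ (s : List Char) (k : Nat), k ≤ s.length →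
      (gdecTab dt s).getD k false = gdec dt (s.drop k) := by
  intro s
  induction s with
  | nil =>
    intro k hk
    simp only [List.length_nil, Nat.le_zero] at hk
    subst hk
    simp [gdecTab, gdec]
  | cons b s ih =>
    intro k hk
    cases k with
    | zero => simp [gdecTab, gdec]
    | succ k =>
      simp only [gdecTab, List.getD_cons_succ, List.drop_succ_cons]
      exact ih k (by simpa using hk)

theorem gdec_nil (dt : PySem.Dict String String) : gdec dt [] = true := rfl

theorem gdec_cons (dt : PySem.Dict String String) (b : Char) (s : List Char) :
    gdec dt (b :: s) = (match munchLen dt [b] s with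
                        | none => false
                        | some k => gdec dt (s.drop k)) := by
  simp only [gdec, gdecTab]
  cases hm : munchLen dt [b] s with
  | none => rfl
  | some k =>
    simp only [List.headD_cons]
    exact getD_gdecTab dt s k (munchLen_le dt s [b] k hm)

theorem gstate_eq_munch (dt : PySem.Dict String String) :
    ∀ (s w : List Char),
      gstate dt w s = (match munchLen dt w s with
                       | none => false
                       | some k => gdec dt (s.drop k)) := by
  intro s
  induction s with
  | nil =>
    intro w
    simp only [gstate, munchLen]
    by_cases h : (dt.get? (String.ofList w)).isSome <;> simp [h, gdec_nil]
  | cons b s ih =>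
    intro w
    by_cases h : (dt.get? (String.ofList w)).isSome
    · have hmu : munchLen dt w (b :: s) = some 0 := by simp [munchLen, h]
      have hg : gstate dt w (b :: s) = gstate dt [b] s := by simp [gstate, h]
      rw [hg, hmu, ih [b]]
      show _ = gdec dt (b :: s)
      rw [gdec_cons]
    · have hmu : munchLen dt w (b :: s) = (munchLen dt (w ++ [b]) s).map (· + 1) := by
        simp [munchLen, h]
      have hg : gstate dt w (b :: s) = gstate dt (w ++ [b]) s := by simp [gstate, h]
      rw [hg, hmu, ih (w ++ [b])]
      cases munchLen dt (w ++ [b]) s <;> rfl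

theorem pre_gstate (compressed : String) (td : List (String × String))
    (h : Pre_prefix_free_decompression compressed td) :
    gstate (reverse_dict td) [] compressed.toList = true := by
  unfold Pre_prefix_free_decompression at h
  cases hs : compressed.toList with
  | nil =>
    rw [hs] at h; simp at h
    simpa [gstate] using h
  | cons b s =>
    rw [hs] at h; simp at h
    have h1 : gstate (reverse_dict td) [] (b :: s) = gstate (reverse_dict td) [b] s := by
      simp only [gstate]
      by_cases hm : ((reverse_dict td).get? (String.ofList [])).isSome <;> simp [hm]
    rw [gdec_cons] at h
    cases hm : munchLen (reverse_dict td) [b] s with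
    | none => rw [hm] at h; cases h
    | some k =>
      rw [hm] at h
      rw [h1, gstate_eq_munch, hm]
      exact h

-- the joint simulation: A's (output, word) state against B's (output, node) state
theorem sim (td : List (String × String)) :
    ∀ (s : List Char) (acc : List String) (w : List Char) (node : PTrie),
      descend? (buildTrie td) w = some node →
      gstate (reverse_dict td) w s = true →
      (let st := s.foldl
          (fun (s : List String × List Char) bit =>
            match (reverse_dict td).get? (String.ofList s.2) with
            | some v => (s.1 ++ [v], [bit])
            | none => (s.1, s.2 ++ [bit])) (acc, w)
       st.1 ++ [(reverse_dict td).getD (String.ofList st.2) ""])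
      = (let st := s.foldl
          (fun (s : List String × PTrie) bit =>
            let s1 := match s.2.val with
              | some v => (s.1 ++ [v], buildTrie td)
              | none => s
            match childGet s1.2.ch bit with
            | some n => (s1.1, n)
            | none => (s1.1, emptyTrie)) (acc, node)
         st.1 ++ [st.2.val.getD ""]) := by
  intro s
  induction s with
  | nil =>
    intro acc w node hd hg
    have hval : node.val = (reverse_dict td).get? (String.ofList w) := by
      have h1 := valAt_root td w
      rw [valAt_eq_descend, hd] at h1
      simpa using h1
    simp only [List.foldl_nil]
    rw [PySem.Dict.getD_eq_get?_getD, ← hval]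
  | cons b s ih =>
    intro acc w node hd hg
    have hval : node.val = (reverse_dict td).get? (String.ofList w) := by
      have h1 := valAt_root td w
      rw [valAt_eq_descend, hd] at h1
      simpa using h1
    simp only [List.foldl_cons]
    cases hm : (reverse_dict td).get? (String.ofList w) with
    | some v =>
      -- A yields v and resets the word; B yields v, returns to the root, descends b
      have hnode : node.val = some v := by rw [hval, hm]
      have hg' : gstate (reverse_dict td) [b] s = true := by
        simpa [gstate, hm] using hg
      cases hcg : childGet (buildTrie td).ch b with
      | some n =>
        have hd' : descend? (buildTrie td) [b] = some n := by
          simp [descend?, hcg]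
        simpa [hm, hnode, hcg] using ih (acc ++ [v]) [b] n hd' hg'
      | none =>
        -- off the trie: no extension of [b] is a code, contradicting gstate
        exfalso
        have hbad : ∀ ext, ((reverse_dict td).get? (String.ofList ([b] ++ ext))).isSome = false := by
          intro ext
          have hv : valAt (buildTrie td) ([b] ++ ext) = none := by
            rw [valAt_eq_descend, descend?_append]
            have hdn : descend? (buildTrie td) [b] = none := by
              simp [descend?, hcg]
            rw [hdn]; rfl
          rw [valAt_root] at hv
          rw [hv]; rfl
        have hfalse := gstate_bad (reverse_dict td) s [b] hbad
        rw [hg'] at hfalse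
        simp at hfalse
    | none =>
      have hnode : node.val = none := by rw [hval, hm]
      have hg' : gstate (reverse_dict td) (w ++ [b]) s = true := by
        simpa [gstate, hm] using hg
      have hstep : descend? (buildTrie td) (w ++ [b]) = descend? node [b] := by
        rw [descend?_append, hd]; rfl
      cases hcg : childGet node.ch b with
      | some n =>
        have hd' : descend? (buildTrie td) (w ++ [b]) = some n := by
          rw [hstep]; simp [descend?, hcg]
        simpa [hm, hnode, hcg] using ih acc (w ++ [b]) n hd' hg'
      | none =>
        exfalso
        have hdnone : descend? (buildTrie td) (w ++ [b]) = none := by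
          rw [hstep]; simp [descend?, hcg]
        have hbad : ∀ ext, ((reverse_dict td).get? (String.ofList ((w ++ [b]) ++ ext))).isSome = false := by
          intro ext
          have hv : valAt (buildTrie td) ((w ++ [b]) ++ ext) = none := by
            rw [valAt_eq_descend, descend?_append, hdnone]; rfl
          rw [valAt_root] at hv
          rw [hv]; rfl
        have hfalse := gstate_bad (reverse_dict td) s (w ++ [b]) hbad
        rw [hg'] at hfalse
        simp at hfalse

-- ===== VERDICT (by name: the statement is the Claim_ definition above) =====
theorem prefix_free_decompression_spec : Claim_equal_prefix_free_decompression := by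
  intro compressed td _hdom hpre
  unfold Spec_prefix_free_decompression
  unfold prefix_free_decompression prefix_free_decompression_alt
  exact sim td compressed.toList [] [] (buildTrie td) (by simp [descend?]) (pre_gstate compressed td hpre)
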